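-- pv_equiv track=rewrite | github.com/AustinBoyuJiang/Competitive-Programming | contests/USACO/2021/January/Silver/No Time To Paint.py | check
-- ===== SOURCE A (Python) =====
-- def check(string):
--     if(string==[]):return 0
--     up,down=1,0
--     maxDepth=up
--     minDepth=down
--     for i in range(1,len(string)):
--         if(string[i]>string[i-1]):
--             up+=1
--             down+=1
--         elif(string[i]<string[i-1]):
--             down-=1
--             minDepth=min(minDepth,down)
--         maxDepth=max(maxDepth,up-minDepth)
--     return maxDepth
-- ===== SOURCE B (Python) =====
-- def check(string):
--     if string == []:
--         return 0
--     deltas = [(string[i] > string[i-1]) - (string[i] < string[i-1])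
--               for i in range(1, len(string))]
--     increases = sum(1 for d in deltas if d == 1)
--     minDepth = 0
--     run = 0
--     for d in deltas:
--         run += d
--         minDepth = min(minDepth, run)
--     return 1 + increases - minDepth
-- ===== Notes on version B (the rewrite author's own statement) =====
-- stated objective: alternative
-- what changed: Replaces A's single indexed loop maintaining four state variables (up/down/minDepth/maxDepth with a running max) by a decomposition into a step-delta list, a count of +1 deltas, and a prefix-minimum scan, returning 1 + increases - minDepth directly since up - minDepth is monotone.
import Mathlib
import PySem

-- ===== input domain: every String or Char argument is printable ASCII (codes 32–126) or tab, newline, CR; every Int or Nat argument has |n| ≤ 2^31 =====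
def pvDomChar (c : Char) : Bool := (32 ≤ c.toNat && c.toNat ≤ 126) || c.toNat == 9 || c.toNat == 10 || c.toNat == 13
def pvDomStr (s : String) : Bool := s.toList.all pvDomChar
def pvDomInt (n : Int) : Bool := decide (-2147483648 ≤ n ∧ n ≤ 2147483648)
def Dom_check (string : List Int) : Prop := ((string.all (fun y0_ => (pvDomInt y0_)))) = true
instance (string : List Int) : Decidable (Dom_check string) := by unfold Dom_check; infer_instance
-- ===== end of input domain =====

-- B replaces A's single indexed loop with four running state variables by a decomposition into
-- a step-delta list, a count of +1 deltas and a prefix-minimum scan (objective: alternative).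


-- ===== PORT A =====
def check (string : List Int) : Int :=
  if string = [] then 0
  else
    let s :=
      (PySem.List.pyRange 1 (string.length : Int) 1).foldl
        (fun (s : Int × Int × Int × Int) i =>
          let up := s.1
          let down := s.2.1
          let minDepth := s.2.2.1
          let maxDepth := s.2.2.2
          let t : Int × Int × Int :=
            if PySem.List.pyGetD string i 0 > PySem.List.pyGetD string (i - 1) 0 then
              (up + 1, down + 1, minDepth)
            else if PySem.List.pyGetD string i 0 < PySem.List.pyGetD string (i - 1) 0 then
              (up, down - 1, min minDepth (down - 1))
            else (up, down, minDepth)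
          (t.1, t.2.1, t.2.2, max maxDepth (t.1 - t.2.2)))
        (1, 0, 0, 1)
    s.2.2.2

-- ===== PORT B =====
def check_alt (string : List Int) : Int :=
  if string = [] then 0
  else
    let deltas :=
      (PySem.List.pyRange 1 (string.length : Int) 1).map (fun i =>
        (if PySem.List.pyGetD string i 0 > PySem.List.pyGetD string (i - 1) 0 then (1 : Int) else 0)
        - (if PySem.List.pyGetD string i 0 < PySem.List.pyGetD string (i - 1) 0 then (1 : Int) else 0))
    let increases := deltas.foldl (fun (a : Int) d => if d == 1 then a + 1 else a) 0
    let p := deltas.foldl (fun (p : Int × Int) d => (min p.1 (p.2 + d), p.2 + d)) (0, 0)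
    1 + increases - p.1

-- ===== PRECONDITION & SPEC =====
def Spec_check (string : List Int) (out : Int) : Prop := out = check_alt string
instance (string : List Int) (out : Int) : Decidable (Spec_check string out) := by unfold Spec_check; infer_instance

-- ===== CLAIM (what is proved, stated in full; the proofs are below) =====
def Claim_equal_check : Prop := ∀ (string : List Int), Dom_check string → Spec_check string (check string)

-- ===== LEMMAS AND PROOFS =====

-- A's loop body as a function of the step delta d ∈ {-1,0,1}
def stepD (s : Int × Int × Int × Int) (d : Int) : Int × Int × Int × Int :=
  let t : Int × Int × Int :=
    if d = 1 then (s.1 + 1, s.2.1 + 1, s.2.2.1)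
    else if d = -1 then (s.1, s.2.1 - 1, min s.2.2.1 (s.2.1 - 1))
    else (s.1, s.2.1, s.2.2.1)
  (t.1, t.2.1, t.2.2, max s.2.2.2 (t.1 - t.2.2))

lemma stepD_one (s : Int × Int × Int × Int) :
    stepD s 1 = (s.1 + 1, s.2.1 + 1, s.2.2.1, max s.2.2.2 (s.1 + 1 - s.2.2.1)) := by
  simp [stepD]

lemma stepD_zero (s : Int × Int × Int × Int) :
    stepD s 0 = (s.1, s.2.1, s.2.2.1, max s.2.2.2 (s.1 - s.2.2.1)) := by
  simp [stepD]

lemma stepD_negone (s : Int × Int × Int × Int) :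
    stepD s (-1) = (s.1, s.2.1 - 1, min s.2.2.1 (s.2.1 - 1),
      max s.2.2.2 (s.1 - min s.2.2.1 (s.2.1 - 1))) := by
  simp [stepD]

def dlt (x y : Int) : Int := (if x > y then (1 : Int) else 0) - (if x < y then (1 : Int) else 0)

lemma body_eq (x y : Int) (s : Int × Int × Int × Int) :
    (let up := s.1
     let down := s.2.1
     let minDepth := s.2.2.1
     let maxDepth := s.2.2.2
     let t : Int × Int × Int :=
       if x > y then (up + 1, down + 1, minDepth)
       else if x < y then (up, down - 1, min minDepth (down - 1))
       else (up, down, minDepth)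
     ((t.1, t.2.1, t.2.2, max maxDepth (t.1 - t.2.2)) : Int × Int × Int × Int))
      = stepD s (dlt x y) := by
  unfold stepD dlt
  split_ifs with h1 h2 <;> simp_all <;> omega

lemma inc_shift (ds : List Int) (a b : Int) :
    ds.foldl (fun (a : Int) d => if d == 1 then a + 1 else a) (a + b)
      = ds.foldl (fun (a : Int) d => if d == 1 then a + 1 else a) a + b := by
  induction ds generalizing a with
  | nil => rfl
  | cons d ds ih =>
    simp only [List.foldl_cons]
    by_cases h : (d == 1) = true
    · rw [if_pos h, if_pos h, show a + b + 1 = (a + 1) + b by ring, ih]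
    · rw [if_neg h, if_neg h, ih]

lemma main_lemma (ds : List Int) (h : ∀ d ∈ ds, d = 1 ∨ d = 0 ∨ d = -1)
    (up down minD : Int) (hmd : minD ≤ down) :
    ds.foldl stepD (up, down, minD, up - minD)
      = (up + ds.foldl (fun (a : Int) d => if d == 1 then a + 1 else a) 0,
         (ds.foldl (fun (p : Int × Int) d => (min p.1 (p.2 + d), p.2 + d)) (minD, down)).2,
         (ds.foldl (fun (p : Int × Int) d => (min p.1 (p.2 + d), p.2 + d)) (minD, down)).1,
         up + ds.foldl (fun (a : Int) d => if d == 1 then a + 1 else a) 0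
           - (ds.foldl (fun (p : Int × Int) d => (min p.1 (p.2 + d), p.2 + d)) (minD, down)).1) := by
  induction ds generalizing up down minD with
  | nil => simp
  | cons d ds ih =>
    have h' : ∀ d ∈ ds, d = 1 ∨ d = 0 ∨ d = -1 := fun x hx => h x (List.mem_cons_of_mem _ hx)
    rcases h d List.mem_cons_self with hd | hd | hd <;> subst hd <;>
      simp only [List.foldl_cons, stepD_one, stepD_zero, stepD_negone]
    · -- d = 1
      rw [if_pos (show ((1 : Int) == 1) = true by decide),
          show max (up - minD) (up + 1 - minD) = (up + 1) - minD by omega,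
          show min minD (down + 1) = minD by omega,
          ih h' (up + 1) (down + 1) minD (by omega),
          show (0 : Int) + 1 = 0 + 1 from rfl, inc_shift]
      simp only [Prod.mk.injEq]
      exact ⟨by ring, trivial, trivial, by ring⟩
    · -- d = 0
      rw [if_neg (show ¬((0 : Int) == 1) = true by decide),
          show max (up - minD) (up - minD) = up - minD by omega,
          show min minD (down + 0) = minD by omega,
          show down + (0 : Int) = down by ring]
      exact ih h' up down minD hmd
    · -- d = -1
      rw [if_neg (show ¬((-1 : Int) == 1) = true by decide),
          show max (up - minD) (up - min minD (down - 1)) = up - min minD (down - 1) by omega,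
          show down + (-1 : Int) = down - 1 by ring]
      exact ih h' up (down - 1) (min minD (down - 1)) (by omega)

-- ===== VERDICT (by name: the statement is the Claim_ definition above) =====
theorem check_spec : Claim_equal_check := by
  intro string _
  unfold Spec_check check check_alt
  by_cases hs : string = []
  · rw [if_pos hs, if_pos hs]
  · rw [if_neg hs, if_neg hs]
    show (List.foldl
        (fun (s : Int × Int × Int × Int) i =>
          let up := s.1
          let down := s.2.1
          let minDepth := s.2.2.1
          let maxDepth := s.2.2.2
          let t : Int × Int × Int :=
            if PySem.List.pyGetD string i 0 > PySem.List.pyGetD string (i - 1) 0 then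
              (up + 1, down + 1, minDepth)
            else if PySem.List.pyGetD string i 0 < PySem.List.pyGetD string (i - 1) 0 then
              (up, down - 1, min minDepth (down - 1))
            else (up, down, minDepth)
          (t.1, t.2.1, t.2.2, max maxDepth (t.1 - t.2.2)))
        (1, 0, 0, 1) (PySem.List.pyRange 1 (string.length : Int) 1)).2.2.2
      = 1 + (((PySem.List.pyRange 1 (string.length : Int) 1).map
            (fun i => dlt (PySem.List.pyGetD string i 0) (PySem.List.pyGetD string (i - 1) 0))).foldl
              (fun (a : Int) d => if d == 1 then a + 1 else a) 0)
          - (((PySem.List.pyRange 1 (string.length : Int) 1).map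
            (fun i => dlt (PySem.List.pyGetD string i 0) (PySem.List.pyGetD string (i - 1) 0))).foldl
              (fun (p : Int × Int) d => (min p.1 (p.2 + d), p.2 + d)) (0, 0)).1
    rw [show ((1 : Int), (0 : Int), (0 : Int), (1 : Int)) = ((1 : Int), (0 : Int), (0 : Int), (1 : Int) - 0) by norm_num,
        List.foldl_ext _ (fun (s : Int × Int × Int × Int) i =>
          stepD s (dlt (PySem.List.pyGetD string i 0) (PySem.List.pyGetD string (i - 1) 0)))
          _ (fun s b _ => body_eq _ _ s),
        ← List.foldl_map,
        main_lemma _ ?_ 1 0 0 le_rfl]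
    · intro d hd
      rw [List.mem_map] at hd
      obtain ⟨i, _, hi⟩ := hd
      unfold dlt at hi
      split_ifs at hi <;> omega
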